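-- pv_equiv track=rewrite | github.com/IBM/mi-prometheus | miprometheus/grid_workers/grid_analyzer.py | merge_list_dicts
-- ===== SOURCE A (Python) =====
-- def merge_list_dicts(list_dicts):
--     """
--     Merges a list of dictionaries by filling the missing fields with spaces into one dict.
--
--     :param list_dicts: List of dictionaries, potentially containing different headers, which will be merged.
--     :type list_dicts: list
--
--     :return: dict, resulting of the merge.
--
--     """
--     # Create a "unified" header.
--     header = set(k for d in list_dicts for k in d)
--
--     # Create an "empty" dict from the unified header.
--     empty_dict = {k: ' ' for k in header}
--
--     # "Fill" all lists with empty gaps.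
--     list_filled_dicts = []
--     for i, _ in enumerate(list_dicts):
--         list_filled_dicts.append({**empty_dict, **(list_dicts[i])})
--
--     # Zip lists of dicts.
--     final_dict = dict(zip(header, zip(*[d.values() for d in list_filled_dicts])))
--
--     # Return the result.
--     return final_dict
-- ===== SOURCE B (Python) =====
-- def merge_list_dicts(list_dicts):
--     header = set(k for d in list_dicts for k in d)
--     return {k: tuple(d.get(k, ' ') for d in list_dicts) for k in header}
-- ===== Notes on version B (the rewrite author's own statement) =====
-- stated objective: simpler
-- what changed: A pads every dict with a header-shaped empty template, collects the padded dicts in a list and transposes their value lists via dict(zip(header, zip(*...))); B builds the result directly as one dict comprehension that gathers each key's column with d.get(k, ' '), with no empty_dict, no filled list and no zip.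
import Mathlib
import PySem

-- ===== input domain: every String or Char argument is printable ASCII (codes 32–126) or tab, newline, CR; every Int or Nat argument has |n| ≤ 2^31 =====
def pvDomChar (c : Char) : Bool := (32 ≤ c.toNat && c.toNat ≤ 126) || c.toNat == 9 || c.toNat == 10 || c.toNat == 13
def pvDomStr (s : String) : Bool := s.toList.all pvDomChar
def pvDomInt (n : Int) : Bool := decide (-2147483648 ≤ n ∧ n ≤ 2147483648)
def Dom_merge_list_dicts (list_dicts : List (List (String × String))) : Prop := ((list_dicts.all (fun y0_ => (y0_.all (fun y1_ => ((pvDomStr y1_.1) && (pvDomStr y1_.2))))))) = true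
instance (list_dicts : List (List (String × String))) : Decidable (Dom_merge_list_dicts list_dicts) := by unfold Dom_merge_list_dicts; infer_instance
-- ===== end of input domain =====

-- B replaces A's pad-every-dict-with-an-empty-template-then-transpose-via-zip(*…) by a direct
-- per-key gather with d.get(k, ' '); objective: simpler (no empty_dict, no filled list, no zip).

-- ===== PORT A =====
-- both Pythons compute `set(k for d in list_dicts for k in d)`; shared helper
def pvHeader (list_dicts : List (List (String × String))) : PySem.Set String :=
  PySem.Set.ofList (list_dicts.flatMap (fun d => (PySem.Dict.mk d).keys))

-- zip(*rows): Python's n-ary zip, ported by hand (exact: truncates at the shortest row; zip() of no iterables is empty)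
def pyZipStar : List (List String) → List (List String)
  | [] => []
  | r :: rs =>
    if h : (r :: rs).all (fun row => !row.isEmpty) then
      (r :: rs).map (fun row => row.headD "") :: pyZipStar ((r :: rs).map List.tail)
    else []
termination_by rows => (rows.headD []).length
decreasing_by
  simp only [List.all_cons, Bool.and_eq_true, Bool.not_eq_eq_eq_not, Bool.not_true,
    List.isEmpty_eq_false_iff, List.map_cons, List.headD_cons] at *
  cases r with
  | nil => exact absurd rfl h.1
  | cons a t => simp

def merge_list_dicts (list_dicts : List (List (String × String))) : List (String × List String) :=
  let header : PySem.Set String := pvHeader list_dicts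
  let empty_dict : PySem.Dict String String := PySem.Dict.mk (header.map (fun k => (k, " ")))
  let list_filled_dicts : List (PySem.Dict String String) :=
    list_dicts.foldl (fun acc d => acc ++ [empty_dict.update d]) []
  (PySem.Dict.ofList (header.zip (pyZipStar (list_filled_dicts.map PySem.Dict.values)))).items

-- ===== PORT B =====
def merge_list_dicts_alt (list_dicts : List (List (String × String))) : List (String × List String) :=
  let header : PySem.Set String := pvHeader list_dicts
  header.map (fun k => (k, list_dicts.map (fun d => (PySem.Dict.mk d).getD k " ")))

-- ===== PRECONDITION & SPEC =====
-- Pre_ excludes association lists in which one inner "dict" carries the same key twice: those do not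
-- represent any Python dict (dict keys are unique), and the two ports disagree on which duplicate wins.
def Pre_merge_list_dicts (list_dicts : List (List (String × String))) : Prop :=
  ∀ d ∈ list_dicts, (d.map Prod.fst).Nodup
instance (list_dicts : List (List (String × String))) : Decidable (Pre_merge_list_dicts list_dicts) := by
  unfold Pre_merge_list_dicts; infer_instance

def pvWitness_merge_list_dicts : (List (List (String × String))) :=
  [[("a", "1"), ("b", "2")], [("b", "3")]]

def Spec_merge_list_dicts (list_dicts : List (List (String × String))) (out : List (String × List String)) : Prop := out = merge_list_dicts_alt list_dicts
instance (list_dicts : List (List (String × String))) (out : List (String × List String)) : Decidable (Spec_merge_list_dicts list_dicts out) := by unfold Spec_merge_list_dicts; infer_instance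

-- ===== CLAIM (what is proved, stated in full; the proofs are below) =====
def Claim_equal_merge_list_dicts : Prop := ∀ (list_dicts : List (List (String × String))), Dom_merge_list_dicts list_dicts → Pre_merge_list_dicts list_dicts → Spec_merge_list_dicts list_dicts (merge_list_dicts list_dicts)

-- ===== LEMMAS AND PROOFS =====
-- last-wins overlay of an item list over a base function (the value function of {**base, **d})
def ov (d : List (String × String)) (f : String → String) : String → String :=
  d.foldl (fun g p => fun x => if x = p.1 then p.2 else g x) f

lemma ov_cons (p : String × String) (rest : List (String × String)) (g : String → String) :
    ov (p :: rest) g = ov rest (fun x => if x = p.1 then p.2 else g x) := rfl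

lemma ov_spec (d : List (String × String)) (k : String) :
    ∀ f, ov d f k = if k ∈ d.map Prod.fst then ov d (fun _ => " ") k else f k := by
  induction d with
  | nil => intro f; simp [ov]
  | cons p rest ih =>
    intro f
    rw [ov_cons, ov_cons, ih, ih (fun x => if x = p.1 then p.2 else " ")]
    by_cases hk : k ∈ rest.map Prod.fst
    · simp [hk]
    · by_cases hp : k = p.1 <;> simp [hk, hp]

lemma ov_eq_getD (d : List (String × String)) (hnd : (d.map Prod.fst).Nodup) (k : String) :
    ov d (fun _ => " ") k = (PySem.Dict.mk d).getD k " " := by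
  induction d with
  | nil => rfl
  | cons p rest ih =>
    simp only [List.map_cons, List.nodup_cons] at hnd
    rw [ov_cons, ov_spec, PySem.Dict.getD_eq_get?_getD, PySem.Dict.get?_mk_cons]
    by_cases hk : k ∈ rest.map Prod.fst
    · have hne : ¬ (p.1 == k) = true := by
        simp only [beq_iff_eq]; intro h; exact hnd.1 (h ▸ hk)
      rw [if_pos hk, if_neg hne, ih hnd.2, PySem.Dict.getD_eq_get?_getD]
    · rw [if_neg hk]
      by_cases hp : k = p.1
      · simp [hp]
      · have hne : ¬ (p.1 == k) = true := by
          simp only [beq_iff_eq]; exact fun h => hp h.symm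
        rw [if_neg hp, if_neg hne]
        have h2 := ih hnd.2
        rw [ov_spec, if_neg hk, PySem.Dict.getD_eq_get?_getD] at h2
        exact h2

lemma update_items (hdr : List String) (d : List (String × String)) :
    ∀ (f : String → String) (e : PySem.Dict String String),
      e.items = hdr.map (fun k => (k, f k)) → (∀ p ∈ d, p.1 ∈ hdr) →
      (e.update d).items = hdr.map (fun k => (k, ov d f k)) := by
  induction d with
  | nil => intro f e he _; simpa [PySem.Dict.update, ov] using he
  | cons p rest ih =>
    intro f e he hsub
    have hmem : p.1 ∈ hdr := hsub p (by simp)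
    have hcont : e.contains p.1 = true := by
      rw [PySem.Dict.contains_eq_decide_mem_keys]
      simp only [PySem.Dict.keys, he, List.map_map, decide_eq_true_eq]
      simpa using hmem
    have hitems : (e.insert p.1 p.2).items
        = hdr.map (fun k => (k, if k = p.1 then p.2 else f k)) := by
      rw [PySem.Dict.items_insert_of_contains _ _ hcont, he, List.map_map]
      refine List.map_congr_left ?_
      intro k _
      by_cases hk : k = p.1 <;> simp [hk]
    have hupd : e.update (p :: rest) = (e.insert p.1 p.2).update rest := rfl
    rw [hupd, ih (fun x => if x = p.1 then p.2 else f x) _ hitems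
        (fun q hq => hsub q (by simp [hq])), ov_cons]


lemma update_items_append {ν : Type} (pairs : List (String × ν)) :
    ∀ e : PySem.Dict String ν, (pairs.map Prod.fst).Nodup →
      (∀ p ∈ pairs, e.contains p.1 = false) →
      (e.update pairs).items = e.items ++ pairs := by
  induction pairs with
  | nil => intro e _ _; simp [PySem.Dict.update]
  | cons p rest ih =>
    intro e hnd hdisj
    simp only [List.map_cons, List.nodup_cons] at hnd
    have hc : e.contains p.1 = false := hdisj p (by simp)
    have hupd : e.update (p :: rest) = (e.insert p.1 p.2).update rest := rfl
    rw [hupd, ih _ hnd.2]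
    · rw [PySem.Dict.items_insert_of_not_contains _ _ hc]
      simp
    · intro q hq
      rw [PySem.Dict.contains_insert]
      have h1 : ¬ (q.1 == p.1) = true := by
        simp only [beq_iff_eq]
        intro h; exact hnd.1 (h ▸ List.mem_map_of_mem hq)
      simp only [Bool.or_eq_false_iff]
      exact ⟨by simpa using h1, hdisj q (by simp [hq])⟩

lemma getD_tail (r : List String) (i : Nat) : r.tail.getD i "" = r.getD (i + 1) "" := by
  cases r <;> simp [List.getD]

lemma pyZipStar_const_len (n : Nat) :
    ∀ rows : List (List String), rows ≠ [] → (∀ r ∈ rows, r.length = n) →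
      pyZipStar rows = (List.range n).map (fun i => rows.map (fun r => r.getD i "")) := by
  induction n with
  | zero =>
    intro rows hne hlen
    match rows with
    | r :: rs =>
      have hr : r = [] := List.eq_nil_of_length_eq_zero (hlen r (by simp))
      rw [pyZipStar]
      simp [hr]
  | succ n ih =>
    intro rows hne hlen
    match rows with
    | r :: rs =>
      have hall : (r :: rs).all (fun row => !row.isEmpty) = true := by
        simp only [List.all_eq_true, Bool.not_eq_eq_eq_not, Bool.not_true,
          List.isEmpty_eq_false_iff]
        intro row hrow
        have := hlen row hrow
        intro h; rw [h] at this; simp at this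
      rw [pyZipStar, dif_pos hall]
      rw [ih ((r :: rs).map List.tail) (by simp)
          (by intro t ht
              obtain ⟨row, hrow, rfl⟩ := List.mem_map.mp ht
              have := hlen row hrow
              simp [List.length_tail, this])]
      rw [List.range_succ_eq_map]
      simp only [List.map_cons, List.map_map]
      refine List.cons_eq_cons.mpr ⟨?_, ?_⟩
      · simp only [List.headD_eq_head?_getD, List.getD_eq_getElem?_getD]
        refine List.cons_eq_cons.mpr ⟨?_, List.map_congr_left fun a _ => ?_⟩
        · cases r <;> simp
        · cases a <;> simp
      · refine List.map_congr_left ?_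
        intro i _
        simp only [Function.comp]
        refine List.cons_eq_cons.mpr ⟨getD_tail r i, ?_⟩
        refine List.map_congr_left ?_
        intro row _
        exact getD_tail row i

-- ===== VERDICT (by name: the statement is the Claim_ definition above) =====
theorem merge_list_dicts_spec : Claim_equal_merge_list_dicts := by
  intro l _ hpre
  unfold Spec_merge_list_dicts
  by_cases hl : l = []
  · subst hl; rfl
  · have hA : merge_list_dicts l
        = (PySem.Dict.ofList ((pvHeader l).zip (pyZipStar
            ((l.foldl (fun acc d => acc ++
              [(PySem.Dict.mk ((pvHeader l).map (fun k => (k, " ")))).update d]) []).map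
              PySem.Dict.values)))).items := rfl
    have hB : merge_list_dicts_alt l
        = (pvHeader l).map (fun k => (k, l.map (fun d => (PySem.Dict.mk d).getD k " "))) := rfl
    rw [hA, hB]
    set hdr : List String := pvHeader l with hhdr
    have hnd : hdr.Nodup := PySem.Set.nodup_ofList _
    have hsub : ∀ d ∈ l, ∀ p ∈ d, p.1 ∈ hdr := by
      intro d hd p hp
      rw [hhdr]
      unfold pvHeader
      rw [PySem.Set.mem_ofList]
      refine List.mem_flatMap.mpr ⟨d, hd, ?_⟩
      simp only [PySem.Dict.keys]
      exact List.mem_map_of_mem hp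
    -- the filled-dicts loop is a map
    rw [PySem.List.foldl_append_singleton_eq_map
      (fun d => (PySem.Dict.mk (hdr.map (fun k => (k, " ")))).update d) l []]
    rw [List.nil_append, List.map_map]
    -- each filled dict's value row
    have hrows : l.map (PySem.Dict.values ∘ fun d =>
          (PySem.Dict.mk (hdr.map (fun k => (k, " ")))).update d)
        = l.map (fun d => hdr.map (fun k => ov d (fun _ => " ") k)) := by
      refine List.map_congr_left ?_
      intro d hd
      simp only [Function.comp, PySem.Dict.values]
      rw [update_items hdr d (fun _ => " ") _ rfl (hsub d hd), List.map_map]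
      rfl
    rw [hrows]
    -- transpose the rows (all of length hdr.length)
    rw [pyZipStar_const_len hdr.length _ (by simpa using hl)
      (by intro r hr
          obtain ⟨d, _, rfl⟩ := List.mem_map.mp hr
          simp)]
    set cols : List (List String) := (List.range hdr.length).map
      (fun i => (l.map (fun d => hdr.map (fun k => ov d (fun _ => " ") k))).map
        (fun r => r.getD i "")) with hcols
    -- dict() of the zipped pairs keeps them as they are (keys are distinct)
    have hcolslen : cols.length = hdr.length := by simp [hcols]
    have hfst : (hdr.zip cols).map Prod.fst = hdr :=
      List.map_fst_zip (le_of_eq hcolslen.symm)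
    have hitems : (PySem.Dict.ofList (hdr.zip cols)).items = hdr.zip cols := by
      have := update_items_append (hdr.zip cols) PySem.Dict.empty
        (by rw [hfst]; exact hnd)
        (fun p _ => PySem.Dict.contains_empty _)
      simpa [PySem.Dict.ofList] using this
    rw [hitems]
    -- the zipped pairs are exactly B's per-key gather
    refine List.ext_getElem (by simp [hcolslen]) ?_
    intro i hi1 hi2
    have hih : i < hdr.length := by simpa using hi2
    have hic : i < cols.length := by rw [hcolslen]; exact hih
    rw [List.getElem_zip]
    simp only [hcols, List.getElem_map, List.getElem_range, List.map_map]
    refine Prod.ext rfl ?_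
    refine List.map_congr_left ?_
    intro d hd
    simp only [Function.comp]
    rw [List.getD_eq_getElem _ _ (by simpa using hih), List.getElem_map,
      ov_eq_getD d (hpre d hd)]
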